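-- pv_equiv track=rewrite | github.com/thu-nics/C2C | rosetta/train/model_utils.py | last_aligned_sources
-- ===== SOURCE A (Python) =====
-- from typing import Dict, Any, List
--
-- def last_aligned_sources(num_target_layers: int, num_source_layers: int, k: int = 1) -> Dict[int, List[int]]:
--     """
--     Return a per-target mapping that aligns the last target layer to the last
--     source layer and walks toward the front.
--
--     Returns: Dict[target_idx, List[source_idx]] only for targets we map. For each
--     target t, we choose up to K sources anchored at the aligned index, preferring
--     backward indices first then forward to satisfy K.
--
--     Example (T=11, S=33): target 10 -> [32, 31, ...], target 9 -> [31, 30, ...]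
--     """
--     mapping: Dict[int, List[int]] = {}
--     if num_target_layers <= 0 or num_source_layers <= 0:
--         return mapping
--
--     # Align ends; offset >= 0 means extra source layers at the front
--     offset = num_source_layers - num_target_layers
--
--     def take_k_from(s0: int) -> List[int]:
--         result: List[int] = []
--         # Prefer moving backward from the anchor (last-to-front)
--         for back in range(k):
--             idx = s0 - back
--             if 0 <= idx < num_source_layers:
--                 result.append(idx)
--         # If not enough due to boundary, extend forward
--         next_idx = s0 + 1
--         while len(result) < k and next_idx < num_source_layers:
--             result.append(next_idx)
--             next_idx += 1
--         return result
--
--     for t in range(num_target_layers):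
--         s0 = offset + t
--         # Clamp to valid range for edge cases (e.g., fewer source layers)
--         if s0 < 0:
--             s0 = 0
--         elif s0 > num_source_layers - 1:
--             s0 = num_source_layers - 1
--         chosen = take_k_from(s0)
--         if len(chosen) > 0:
--             mapping[t] = chosen
--
--     return mapping
-- ===== SOURCE B (Python) =====
-- def last_aligned_sources(num_target_layers: int, num_source_layers: int, k: int = 1):
--     # Closed-form per-position formula: every mapped target's list has length
--     # n = min(k, num_source_layers), and its d-th element is s0-d while d <= s0,
--     # else d itself (the forward fill).  No two-phase backward/forward build,
--     # no per-element boundary tests, no conditional insertion.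
--     mapping = {}
--     if num_target_layers <= 0 or num_source_layers <= 0:
--         return mapping
--     n = min(k, num_source_layers)
--     if n <= 0:
--         return mapping
--     offset = num_source_layers - num_target_layers
--     for t in range(num_target_layers):
--         s0 = min(max(offset + t, 0), num_source_layers - 1)
--         mapping[t] = [s0 - d if d <= s0 else d for d in range(n)]
--     return mapping
-- ===== Notes on version B (the rewrite author's own statement) =====
-- stated objective: simpler
-- what changed: B derives for each target a single closed-form description of the whole list -- its length is always min(k, num_source_layers) and its d-th element is s0-d when d<=s0 else d -- so the backward boundary-test loop, the forward while-loop and the non-emptiness-guarded dict insertion all disappear; k<=0 is handled once by an early return.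
import Mathlib
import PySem

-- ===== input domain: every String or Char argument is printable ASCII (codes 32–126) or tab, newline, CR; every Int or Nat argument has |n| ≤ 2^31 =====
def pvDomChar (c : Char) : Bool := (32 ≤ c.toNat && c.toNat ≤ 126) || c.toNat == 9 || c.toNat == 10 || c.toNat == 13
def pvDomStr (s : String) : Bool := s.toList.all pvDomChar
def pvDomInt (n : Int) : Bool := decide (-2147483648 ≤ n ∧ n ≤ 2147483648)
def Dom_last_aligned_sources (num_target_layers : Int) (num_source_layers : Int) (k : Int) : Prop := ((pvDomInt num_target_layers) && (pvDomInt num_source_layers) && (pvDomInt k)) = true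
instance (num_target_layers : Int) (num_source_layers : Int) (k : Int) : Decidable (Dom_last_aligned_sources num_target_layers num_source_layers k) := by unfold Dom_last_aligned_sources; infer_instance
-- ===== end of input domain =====

-- B replaces A's two-phase (backward scan + forward while) per-target construction and
-- guarded dict insertion by one closed-form list per target: length min(k,S), d-th entry
-- s0-d when d ≤ s0 else d; objective: simpler.

-- ===== PORT A =====
-- the 'while len(result) < k and next_idx < num_source_layers' loop of take_k_from
def pvExtendFwd (k S : Int) (next : Int) (result : List Int) : List Int :=
  if h : (result.length : Int) < k ∧ next < S then
    pvExtendFwd k S (next + 1) (result ++ [next])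
  else result
termination_by (S - next).toNat
decreasing_by omega

-- A's helper take_k_from (k, num_source_layers captured)
def pvTakeKFrom (k S s0 : Int) : List Int :=
  let result := (PySem.List.pyRange 0 k 1).foldl
    (fun acc back =>
      let idx := s0 - back
      if 0 ≤ idx ∧ idx < S then acc ++ [idx] else acc) []
  pvExtendFwd k S (s0 + 1) result

-- the body of A's 'for t in range(num_target_layers)' loop
def pvStepA (k S off : Int) (m : PySem.Dict Int (List Int)) (t : Int) : PySem.Dict Int (List Int) :=
  let s0 := off + t
  let s0 := if s0 < 0 then 0 else if s0 > S - 1 then S - 1 else s0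
  let chosen := pvTakeKFrom k S s0
  if 0 < chosen.length then m.insert t chosen else m

def last_aligned_sources (num_target_layers : Int) (num_source_layers : Int) (k : Int) : List (Int × List Int) :=
  if num_target_layers ≤ 0 ∨ num_source_layers ≤ 0 then
    (PySem.Dict.empty : PySem.Dict Int (List Int)).items
  else
    let offset := num_source_layers - num_target_layers
    ((PySem.List.pyRange 0 num_target_layers 1).foldl
      (pvStepA k num_source_layers offset)
      (PySem.Dict.empty : PySem.Dict Int (List Int))).items

-- ===== PORT B =====
def last_aligned_sources_alt (num_target_layers : Int) (num_source_layers : Int) (k : Int) : List (Int × List Int) :=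
  if num_target_layers ≤ 0 ∨ num_source_layers ≤ 0 then []
  else
    let n := min k num_source_layers
    if n ≤ 0 then []
    else
      let offset := num_source_layers - num_target_layers
      (PySem.List.pyRange 0 num_target_layers 1).map
        (fun t =>
          let s0 := min (max (offset + t) 0) (num_source_layers - 1)
          (t, (PySem.List.pyRange 0 n 1).map (fun d => if d ≤ s0 then s0 - d else d)))

-- ===== PRECONDITION & SPEC =====
def Spec_last_aligned_sources (num_target_layers : Int) (num_source_layers : Int) (k : Int) (out : List (Int × List Int)) : Prop := out = last_aligned_sources_alt num_target_layers num_source_layers k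
instance (num_target_layers : Int) (num_source_layers : Int) (k : Int) (out : List (Int × List Int)) : Decidable (Spec_last_aligned_sources num_target_layers num_source_layers k out) := by unfold Spec_last_aligned_sources; infer_instance

-- ===== CLAIM =====
def Claim_equal_last_aligned_sources : Prop := ∀ (num_target_layers : Int) (num_source_layers : Int) (k : Int), Dom_last_aligned_sources num_target_layers num_source_layers k → Spec_last_aligned_sources num_target_layers num_source_layers k (last_aligned_sources num_target_layers num_source_layers k)

-- ===== LEMMAS AND PROOFS =====

-- B's closed-form list for a target with clamped anchor s0 (as in the port of B)
def pvChoB (k S s0 : Int) : List Int :=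
  (PySem.List.pyRange 0 (min k S) 1).map (fun d => if d ≤ s0 then s0 - d else d)

theorem pvExtendFwd_spec (k S : Int) (next : Int) (result : List Int) :
    pvExtendFwd k S next result =
      result ++ PySem.List.pyRange next (next + max 0 (min (k - result.length) (S - next))) 1 := by
  fun_induction pvExtendFwd with
  | case1 next result h ih =>
      rw [ih, PySem.List.pyRange_one_cons
        (show next < next + max 0 (min (k - (result.length : Int)) (S - next)) by omega)]
      simp only [List.append_assoc, List.singleton_append, List.length_append,
        List.length_cons, List.length_nil, Nat.cast_add, Nat.cast_one]
      congr 2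
      refine congrArg (fun e => PySem.List.pyRange (next + 1) e 1) ?_
      omega
  | case2 next result h =>
      rw [PySem.List.pyRange_one_eq_nil
        (show next + max 0 (min (k - (result.length : Int)) (S - next)) ≤ next by omega)]
      simp

theorem pvMapSub (s0 m : Int) :
    (PySem.List.pyRange 0 m 1).map (fun b => s0 - b) = PySem.List.pyRange s0 (s0 - m) (-1) := by
  by_cases hm : m ≤ 0
  · rw [PySem.List.pyRange_one_eq_nil hm, PySem.List.pyRange_neg_one_eq_nil (by omega)]
    rfl
  · obtain ⟨n, rfl⟩ : ∃ n : Nat, m = (n : Int) := ⟨m.toNat, by omega⟩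
    rw [PySem.List.pyRange_zero_natCast, PySem.List.pyRange_neg_one, List.map_map,
      show (s0 - (s0 - (n : Int))).toNat = n from by omega]
    simp [Function.comp]

theorem pvBack_spec (k S s0 : Int) (h0 : 0 ≤ s0) (h1 : s0 < S) :
    ((PySem.List.pyRange 0 k 1).foldl
      (fun acc back =>
        let idx := s0 - back
        if 0 ≤ idx ∧ idx < S then acc ++ [idx] else acc) []) =
      PySem.List.pyRange s0 (s0 - min k (s0 + 1)) (-1) := by
  have hfun : (fun (acc : List Int) (back : Int) =>
        let idx := s0 - back
        if 0 ≤ idx ∧ idx < S then acc ++ [idx] else acc)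
      = fun acc back =>
        if (decide (0 ≤ s0 - back ∧ s0 - back < S)) = true then acc ++ [(fun b => s0 - b) back] else acc := by
    funext acc back
    simp
  rw [hfun, PySem.List.foldl_append_if]
  have hfil : (PySem.List.pyRange 0 k 1).filter (fun back => decide (0 ≤ s0 - back ∧ s0 - back < S))
      = PySem.List.pyRange 0 (min k (s0 + 1)) 1 := by
    have hpt : ∀ x ∈ PySem.List.pyRange 0 k 1,
        (decide (0 ≤ s0 - x ∧ s0 - x < S)) = (decide (x ≤ s0)) := by
      intro x hx
      have := PySem.List.mem_pyRange_one.mp hx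
      simp only [decide_eq_decide]
      omega
    rw [List.filter_congr hpt]
    by_cases hk : k ≤ s0 + 1
    · rw [min_eq_left hk, List.filter_eq_self.mpr]
      intro x hx
      have := PySem.List.mem_pyRange_one.mp hx
      simp only [decide_eq_true_eq]
      omega
    · rw [min_eq_right (by omega), PySem.List.pyRange_one_append 0 (s0 + 1) k (by omega) (by omega),
        List.filter_append, List.filter_eq_self.mpr, List.filter_eq_nil_iff.mpr, List.append_nil]
      · intro x hx
        have := PySem.List.mem_pyRange_one.mp hx
        simp only [decide_eq_true_eq]
        omega
      · intro x hx
        have := PySem.List.mem_pyRange_one.mp hx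
        simp only [decide_eq_true_eq]
        omega
  rw [hfil, List.nil_append, pvMapSub]

theorem pvTakeKFrom_spec (k S s0 : Int) (h0 : 0 ≤ s0) (h1 : s0 < S) :
    pvTakeKFrom k S s0 =
      PySem.List.pyRange s0 (s0 - min k (s0 + 1)) (-1) ++
      PySem.List.pyRange (s0 + 1) (s0 + 1 + min (k - min k (s0 + 1)) (S - 1 - s0)) 1 := by
  unfold pvTakeKFrom
  rw [pvBack_spec k S s0 h0 h1, pvExtendFwd_spec]
  have hlen : ((PySem.List.pyRange s0 (s0 - min k (s0 + 1)) (-1)).length : Int)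
      = max 0 (min k (s0 + 1)) := by
    rw [PySem.List.length_pyRange_neg_one]
    omega
  congr 2
  omega

-- A's take_k_from equals B's closed-form list (on a clamped anchor)
theorem pvTakeKFrom_eq_choB (k S s0 : Int) (h0 : 0 ≤ s0) (h1 : s0 < S) :
    pvTakeKFrom k S s0 = pvChoB k S s0 := by
  rw [pvTakeKFrom_spec k S s0 h0 h1]
  unfold pvChoB
  by_cases hk : k ≤ 0
  · rw [PySem.List.pyRange_neg_one_eq_nil (by omega),
      PySem.List.pyRange_one_eq_nil (by omega),
      PySem.List.pyRange_one_eq_nil (by omega)]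
    rfl
  · set b := min k (s0 + 1) with hb
    have hbpos : 0 < b := by omega
    have hsplit : PySem.List.pyRange 0 (min k S) 1
        = PySem.List.pyRange 0 b 1 ++ PySem.List.pyRange b (min k S) 1 :=
      PySem.List.pyRange_one_append 0 b (min k S) (by omega) (by omega)
    rw [hsplit, List.map_append]
    congr 1
    · have hpt : ∀ x ∈ PySem.List.pyRange 0 b 1,
          (if x ≤ s0 then s0 - x else x) = s0 - x := by
        intro x hx
        have := PySem.List.mem_pyRange_one.mp hx
        rw [if_pos (by omega)]
      rw [List.map_congr_left hpt, pvMapSub]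
    · by_cases hks : k ≤ s0 + 1
      · -- b = k, forward part empty on both sides
        have hbk : b = k := by omega
        have hmk : min k S = k := by omega
        rw [hbk, hmk, PySem.List.pyRange_one_eq_nil (le_refl k),
          PySem.List.pyRange_one_eq_nil (by omega)]
        rfl
      · -- b = s0 + 1, forward part is d ↦ d
        have hbk : b = s0 + 1 := by omega
        have hpt : ∀ x ∈ PySem.List.pyRange b (min k S) 1,
            (if x ≤ s0 then s0 - x else x) = x := by
          intro x hx
          have := PySem.List.mem_pyRange_one.mp hx
          rw [if_neg (by omega)]
        rw [List.map_congr_left hpt, List.map_id']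
        rw [hbk]
        refine congrArg (fun e => PySem.List.pyRange (s0 + 1) e 1) ?_
        omega

-- clamped anchor
def pvS0 (S off t : Int) : Int := min (max (off + t) 0) (S - 1)

theorem pvStepA_spec (k S off : Int) (hS : 0 < S) (m : PySem.Dict Int (List Int)) (t : Int) :
    pvStepA k S off m t =
      if 0 < (pvChoB k S (pvS0 S off t)).length then m.insert t (pvChoB k S (pvS0 S off t)) else m := by
  unfold pvStepA pvS0
  have hclamp : (if off + t < 0 then (0 : Int) else if off + t > S - 1 then S - 1 else off + t)
      = min (max (off + t) 0) (S - 1) := by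
    split_ifs <;> omega
  simp only [hclamp]
  rw [pvTakeKFrom_eq_choB k S _ (by omega) (by omega)]

theorem pvChoB_length (k S s0 : Int) :
    ((pvChoB k S s0).length : Int) = max 0 (min k S) := by
  unfold pvChoB
  rw [List.length_map, PySem.List.length_pyRange_one]
  omega

-- folding conditional inserts of strictly increasing fresh keys yields the ordered item list
theorem pvFold_inv (cho : Int → List Int) (n : Nat) :
    (((PySem.List.pyRange 0 (n : Int) 1).foldl
        (fun m t => if 0 < (cho t).length then m.insert t (cho t) else m)
        (PySem.Dict.empty : PySem.Dict Int (List Int))).items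
      = (PySem.List.pyRange 0 (n : Int) 1).foldl
        (fun l t => if cho t ≠ [] then l ++ [(t, cho t)] else l) ([] : List (Int × List Int)))
    ∧ ∀ p ∈ ((PySem.List.pyRange 0 (n : Int) 1).foldl
        (fun m t => if 0 < (cho t).length then m.insert t (cho t) else m)
        (PySem.Dict.empty : PySem.Dict Int (List Int))).items, p.1 < (n : Int) := by
  induction n with
  | zero =>
      simp only [Nat.cast_zero]
      rw [PySem.List.pyRange_one_eq_nil (le_refl 0)]
      exact ⟨rfl, by intro p hp; simp [PySem.Dict.empty] at hp⟩
  | succ n ih =>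
      obtain ⟨ih1, ih2⟩ := ih
      have hrange : PySem.List.pyRange 0 ((n + 1 : Nat) : Int) 1
          = PySem.List.pyRange 0 (n : Int) 1 ++ [(n : Int)] := by
        push_cast
        exact PySem.List.pyRange_one_succ_right (by positivity)
      rw [hrange, List.foldl_append, List.foldl_append]
      simp only [List.foldl_cons, List.foldl_nil]
      by_cases hc : 0 < (cho (n : Int)).length
      · have hne : cho (n : Int) ≠ [] := by
          intro hnil
          rw [hnil] at hc
          simp at hc
        rw [if_pos hc, if_pos hne]
        have hcont : ((PySem.List.pyRange 0 (n : Int) 1).foldl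
            (fun m t => if 0 < (cho t).length then m.insert t (cho t) else m)
            (PySem.Dict.empty : PySem.Dict Int (List Int))).contains (n : Int) = false := by
          by_contra hcon
          have htrue := Bool.not_eq_false _ |>.mp hcon
          have hmem := (PySem.Dict.contains_iff_mem_keys _ _).mp htrue
          simp only [PySem.Dict.keys] at hmem
          obtain ⟨p, hp, hp1⟩ := List.mem_map.mp hmem
          have := ih2 p hp
          omega
        constructor
        · rw [PySem.Dict.items_insert_of_not_contains _ _ hcont, ih1]
        · intro p hp
          rw [PySem.Dict.items_insert_of_not_contains _ _ hcont] at hp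
          rcases List.mem_append.mp hp with hmem | hmem
          · have := ih2 p hmem
            push_cast
            omega
          · simp only [List.mem_singleton] at hmem
            rw [hmem]
            show (n : Int) < ((n + 1 : Nat) : Int)
            push_cast
            omega
      · have hne : ¬ cho (n : Int) ≠ [] := by
          simp only [ne_eq, not_not]
          rcases List.eq_nil_or_concat (cho (n : Int)) with h | ⟨l, a, h⟩
          · exact h
          · exfalso; apply hc; rw [h]; simp
        rw [if_neg hc, if_neg hne]
        refine ⟨ih1, ?_⟩
        intro p hp
        have := ih2 p hp
        push_cast
        omega

-- the conditional append fold = map when every list is nonempty, = [] when all empty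
theorem pvFold_map (cho : Int → List Int) (T : Int)
    (h : ∀ t, cho t ≠ []) :
    (PySem.List.pyRange 0 T 1).foldl
        (fun l t => if cho t ≠ [] then l ++ [(t, cho t)] else l) ([] : List (Int × List Int))
      = (PySem.List.pyRange 0 T 1).map (fun t => (t, cho t)) := by
  have hgen : ∀ (xs : List Int) (acc : List (Int × List Int)),
      xs.foldl (fun l t => if cho t ≠ [] then l ++ [(t, cho t)] else l) acc
        = acc ++ xs.map (fun t => (t, cho t)) := by
    intro xs
    induction xs with
    | nil => intro acc; simp
    | cons x xs ih =>
        intro acc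
        simp only [List.foldl_cons, List.map_cons]
        rw [if_pos (h x), ih]
        simp
  simpa using hgen (PySem.List.pyRange 0 T 1) []

theorem pvFold_nil (cho : Int → List Int) (T : Int)
    (h : ∀ t, cho t = []) :
    (PySem.List.pyRange 0 T 1).foldl
        (fun l t => if cho t ≠ [] then l ++ [(t, cho t)] else l) ([] : List (Int × List Int))
      = [] := by
  induction PySem.List.pyRange 0 T 1 with
  | nil => rfl
  | cons x xs ih =>
      simp only [List.foldl_cons]
      rw [if_neg (by simp [h x]), ih]

-- ===== VERDICT =====
theorem last_aligned_sources_spec : Claim_equal_last_aligned_sources := by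
  intro T S k _hd
  unfold Spec_last_aligned_sources last_aligned_sources last_aligned_sources_alt
  by_cases h : T ≤ 0 ∨ S ≤ 0
  · rw [if_pos h, if_pos h]
    rfl
  · rw [if_neg h, if_neg h]
    have hS : 0 < S := by
      rcases not_or.mp h with ⟨-, h2⟩
      omega
    have hA : pvStepA k S (S - T)
        = (fun m t => if 0 < (pvChoB k S (pvS0 S (S - T) t)).length
            then m.insert t (pvChoB k S (pvS0 S (S - T) t)) else m) :=
      funext fun m => funext fun t => pvStepA_spec k S (S - T) hS m t
    simp only [hA]
    obtain ⟨n, hTn⟩ : ∃ n : Nat, T = (n : Int) := ⟨T.toNat, by omega⟩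
    have hitems := (pvFold_inv (fun t => pvChoB k S (pvS0 S (S - T) t)) n).1
    rw [hTn] at *
    rw [hitems]
    by_cases hk : min k S ≤ 0
    · rw [if_pos hk]
      exact pvFold_nil _ _ (fun t => by
        have := pvChoB_length k S (pvS0 S (S - (n : Int)) t)
        have : ((pvChoB k S (pvS0 S (S - (n : Int)) t)).length : Int) = 0 := by omega
        exact List.eq_nil_of_length_eq_zero (by exact_mod_cast this))
    · rw [if_neg hk]
      rw [pvFold_map _ _ (fun t => by
        have := pvChoB_length k S (pvS0 S (S - (n : Int)) t)
        intro hnil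
        rw [hnil] at this
        simp at this
        omega)]
      apply List.map_congr_left
      intro t _
      rfl
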